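-- pv_equiv track=rewrite | github.com/zazabap/problem-reductions | docs/paper/verify-reductions/verify_minimum_vertex_cover_partial_feedback_edge_set.py | is_valid_pfes
-- ===== SOURCE A (Python) =====
-- def find_all_cycles_up_to_length(n, edges, max_len):
--     if n == 0 or not edges or max_len < 3:
--         return []
--     adj = [[] for _ in range(n)]
--     for idx, (u, v) in enumerate(edges):
--         adj[u].append((v, idx))
--         adj[v].append((u, idx))
--     cycles = set()
--     visited = [False] * n
--
--     def dfs(start, current, path_edges, path_len):
--         for neighbor, eidx in adj[current]:
--             if neighbor == start and path_len + 1 >= 3: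
--                 if path_len + 1 <= max_len:
--                     cycles.add(frozenset(path_edges + [eidx]))
--                 continue
--             if visited[neighbor] or neighbor < start or path_len + 1 >= max_len:
--                 continue
--             visited[neighbor] = True
--             dfs(start, neighbor, path_edges + [eidx], path_len + 1)
--             visited[neighbor] = False
--
--     for start in range(n):
--         visited[start] = True
--         for neighbor, eidx in adj[start]:
--             if neighbor <= start:
--                 continue
--             visited[neighbor] = True
--             dfs(start, neighbor, [eidx], 1)
--             visited[neighbor] = False
--         visited[start] = False
--     return [list(c) for c in cycles]
--
-- def is_valid_pfes(n, edges, budget, max_cycle_len, config):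
--     if len(config) != len(edges):
--         return False
--     if sum(config) > budget:
--         return False
--     kept_edges = [(u, v) for (u, v), c in zip(edges, config) if c == 0]
--     cycles = find_all_cycles_up_to_length(n, kept_edges, max_cycle_len)
--     return len(cycles) == 0
-- ===== SOURCE B (Python) =====
-- def is_valid_pfes(n, edges, budget, max_cycle_len, config):
--     if len(config) != len(edges) or sum(config) > budget:
--         return False
--     kept = [e for e, c in zip(edges, config) if c == 0]
--     if n == 0 or not kept or max_cycle_len < 3:
--         return True
--     adj = [[] for _ in range(n)]
--     for u, v in kept:
--         adj[u].append(v)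
--         adj[v].append(u)
--     visited = [False] * n
--
--     def search(start, cur, depth):
--         # early-exit existence search: no path or edge-index bookkeeping
--         for nb in adj[cur]:
--             if nb == start and depth + 1 >= 3 and depth + 1 <= max_cycle_len:
--                 return True
--             if nb == start or visited[nb] or nb < start or depth + 1 >= max_cycle_len:
--                 continue
--             visited[nb] = True
--             if search(start, nb, depth + 1):
--                 return True
--             visited[nb] = False
--         return False
--
--     for start in range(n):
--         visited[start] = True
--         for nb in adj[start]:
--             if start < nb:
--                 visited[nb] = True
--                 if search(start, nb, 1):
--                     return False
--                 visited[nb] = False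
--         visited[start] = False
--     return True
-- ===== Notes on version B (the rewrite author's own statement) =====
-- stated objective: alternative
-- what changed: A enumerates ALL cycles of length 3..max_cycle_len, copying the edge-index path at every DFS step and collecting one frozenset per cycle before testing emptiness; B answers the emptiness question directly with a boolean early-exit DFS that keeps no path, edge-index or cycle-set bookkeeping at all and returns at the first short cycle found.
import Mathlib
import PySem

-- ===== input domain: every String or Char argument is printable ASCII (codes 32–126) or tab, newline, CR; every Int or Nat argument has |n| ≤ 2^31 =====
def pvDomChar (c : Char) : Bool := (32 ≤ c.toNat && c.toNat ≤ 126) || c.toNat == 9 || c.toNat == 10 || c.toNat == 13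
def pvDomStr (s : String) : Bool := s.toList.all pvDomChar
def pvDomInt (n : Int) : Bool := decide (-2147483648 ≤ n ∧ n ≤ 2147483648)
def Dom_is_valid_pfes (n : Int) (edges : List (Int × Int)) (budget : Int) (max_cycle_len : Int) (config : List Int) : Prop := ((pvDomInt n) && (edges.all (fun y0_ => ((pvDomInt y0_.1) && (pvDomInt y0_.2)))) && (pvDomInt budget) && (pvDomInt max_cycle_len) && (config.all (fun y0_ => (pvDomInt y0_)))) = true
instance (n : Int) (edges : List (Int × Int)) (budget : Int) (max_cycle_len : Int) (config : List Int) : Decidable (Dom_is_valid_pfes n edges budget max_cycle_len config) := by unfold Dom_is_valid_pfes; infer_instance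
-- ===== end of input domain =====

-- B replaces A's exhaustive collection of ALL short cycles into a set of frozensets by an
-- early-exit boolean DFS that keeps no path/edge-index/cycle-set bookkeeping at all
-- (objective: alternative — decide emptiness directly instead of materialising the cycles).

-- ===== PORT A =====
-- adj[i].append(x)  (Python list index semantics; out-of-range = IndexError, excluded by Pre_)
def pfesAppendAt {α : Type} (adj : List (List α)) (i : Int) (x : α) : List (List α) :=
  PySem.List.pySetD adj i (PySem.List.pyGetD adj i [] ++ [x])

-- adjacency of find_all_cycles_up_to_length: adj[u].append((v, idx)); adj[v].append((u, idx))
def pfesBuildA (n : Int) (kept : List (Int × Int)) : List (List (Int × Int)) :=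
  (PySem.List.enumerate kept).foldl
    (fun adj p => pfesAppendAt (pfesAppendAt adj p.2.1 (p.2.2, p.1)) p.2.2 (p.2.1, p.1))
    (List.replicate n.toNat [])

-- the inner `dfs` of A: loop over adj[current]; `cycles` threaded as a PySem.Set of frozensets
-- (frozenset of edge indices ↦ Finset Int); fuel only makes the recursion structural (each
-- descent marks a fresh unvisited vertex, so fuel = n never runs out on inputs in Pre_).
def pfesDfsA (adjA : List (List (Int × Int))) (maxLen start : Int) :
    Nat → List (Int × Int) → List Int → Int → List Bool → PySem.Set (Finset Int) →
    List Bool × PySem.Set (Finset Int)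
  | _, [], _, _, vis, cyc => (vis, cyc)
  | fuel, (nb, eidx) :: rest, pe, pl, vis, cyc =>
    if nb = start ∧ 3 ≤ pl + 1 then
      pfesDfsA adjA maxLen start fuel rest pe pl vis
        (if pl + 1 ≤ maxLen then PySem.Set.add cyc (pe ++ [eidx]).toFinset else cyc)
    else if PySem.List.pyGetD vis nb false = true ∨ nb < start ∨ maxLen ≤ pl + 1 then
      pfesDfsA adjA maxLen start fuel rest pe pl vis cyc
    else
      match fuel with
      | 0 => pfesDfsA adjA maxLen start 0 rest pe pl vis cyc
      | fuel' + 1 =>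
        let r := pfesDfsA adjA maxLen start fuel' (PySem.List.pyGetD adjA nb [])
                   (pe ++ [eidx]) (pl + 1) (PySem.List.pySetD vis nb true) cyc
        pfesDfsA adjA maxLen start (fuel' + 1) rest pe pl (PySem.List.pySetD r.1 nb false) r.2
  termination_by fuel nbrs => (fuel, nbrs.length)

-- the loop `for neighbor, eidx in adj[start]` of A's main loop
def pfesInnerA (adjA : List (List (Int × Int))) (maxLen start : Int) (fuel : Nat) :
    List (Int × Int) → List Bool → PySem.Set (Finset Int) → List Bool × PySem.Set (Finset Int)
  | [], vis, cyc => (vis, cyc)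
  | (nb, eidx) :: rest, vis, cyc =>
    if nb ≤ start then pfesInnerA adjA maxLen start fuel rest vis cyc
    else
      let r := pfesDfsA adjA maxLen start fuel (PySem.List.pyGetD adjA nb []) [eidx] 1
                 (PySem.List.pySetD vis nb true) cyc
      pfesInnerA adjA maxLen start fuel rest (PySem.List.pySetD r.1 nb false) r.2

-- the loop `for start in range(n)` of A
def pfesOuterA (adjA : List (List (Int × Int))) (maxLen : Int) (fuel : Nat) :
    List Int → List Bool → PySem.Set (Finset Int) → List Bool × PySem.Set (Finset Int)
  | [], vis, cyc => (vis, cyc)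
  | start :: rest, vis, cyc =>
    let r := pfesInnerA adjA maxLen start fuel (PySem.List.pyGetD adjA start [])
               (PySem.List.pySetD vis start true) cyc
    pfesOuterA adjA maxLen fuel rest (PySem.List.pySetD r.1 start false) r.2

-- find_all_cycles_up_to_length (returns [list(c) for c in cycles]; a frozenset is listed sorted)
def pfesFindAll (n : Int) (kept : List (Int × Int)) (maxLen : Int) : List (List Int) :=
  if n = 0 ∨ kept = [] ∨ maxLen < 3 then []
  else
    let adjA := pfesBuildA n kept
    let r := pfesOuterA adjA maxLen n.toNat (PySem.List.pyRange 0 n 1)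
               (List.replicate n.toNat false) PySem.Set.empty
    r.2.map (fun c => c.sort (· ≤ ·))

def is_valid_pfes (n : Int) (edges : List (Int × Int)) (budget : Int) (max_cycle_len : Int) (config : List Int) : Bool :=
  if config.length ≠ edges.length then false
  else if budget < config.sum then false
  else
    let kept := ((edges.zip config).filter (fun p => p.2 == 0)).map Prod.fst
    decide ((pfesFindAll n kept max_cycle_len).length = 0)

-- ===== PORT B =====
-- B's adjacency keeps only neighbours, no edge indices
def pfesBuildB (n : Int) (kept : List (Int × Int)) : List (List Int) :=
  kept.foldl (fun adj p => pfesAppendAt (pfesAppendAt adj p.1 p.2) p.2 p.1)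
    (List.replicate n.toNat [])

-- B's `search`: early-exit existence test, no path bookkeeping (fuel as in pfesDfsA)
def pfesSearchB (adjB : List (List Int)) (maxLen start : Int) :
    Nat → List Int → List Bool → Int → List Bool × Bool
  | _, [], vis, _ => (vis, false)
  | fuel, nb :: rest, vis, d =>
    if nb = start ∧ 3 ≤ d + 1 ∧ d + 1 ≤ maxLen then (vis, true)
    else if nb = start ∨ PySem.List.pyGetD vis nb false = true ∨ nb < start ∨ maxLen ≤ d + 1 then
      pfesSearchB adjB maxLen start fuel rest vis d
    else
      match fuel with
      | 0 => pfesSearchB adjB maxLen start 0 rest vis d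
      | fuel' + 1 =>
        let r := pfesSearchB adjB maxLen start fuel' (PySem.List.pyGetD adjB nb [])
                   (PySem.List.pySetD vis nb true) (d + 1)
        if r.2 then (r.1, true)
        else pfesSearchB adjB maxLen start (fuel' + 1) rest (PySem.List.pySetD r.1 nb false) d
  termination_by fuel nbrs => (fuel, nbrs.length)

-- B's `for nb in adj[start]` loop with its early return
def pfesInnerB (adjB : List (List Int)) (maxLen start : Int) (fuel : Nat) :
    List Int → List Bool → List Bool × Bool
  | [], vis => (vis, false)
  | nb :: rest, vis =>
    if start < nb then
      let r := pfesSearchB adjB maxLen start fuel (PySem.List.pyGetD adjB nb [])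
                 (PySem.List.pySetD vis nb true) 1
      if r.2 then (r.1, true)
      else pfesInnerB adjB maxLen start fuel rest (PySem.List.pySetD r.1 nb false)
    else pfesInnerB adjB maxLen start fuel rest vis

-- B's `for start in range(n)` loop with its early return
def pfesOuterB (adjB : List (List Int)) (maxLen : Int) (fuel : Nat) :
    List Int → List Bool → Bool
  | [], _ => false
  | start :: rest, vis =>
    let r := pfesInnerB adjB maxLen start fuel (PySem.List.pyGetD adjB start [])
               (PySem.List.pySetD vis start true)
    if r.2 then true
    else pfesOuterB adjB maxLen fuel rest (PySem.List.pySetD r.1 start false)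

def is_valid_pfes_alt (n : Int) (edges : List (Int × Int)) (budget : Int) (max_cycle_len : Int) (config : List Int) : Bool :=
  if config.length ≠ edges.length ∨ budget < config.sum then false
  else
    let kept := ((edges.zip config).filter (fun p => p.2 == 0)).map Prod.fst
    if n = 0 ∨ kept = [] ∨ max_cycle_len < 3 then true
    else !(pfesOuterB (pfesBuildB n kept) max_cycle_len n.toNat (PySem.List.pyRange 0 n 1)
             (List.replicate n.toNat false))

-- ===== PRECONDITION & SPEC =====
-- Pre_ excludes exactly the inputs where the Python A raises IndexError: the checks all pass
-- (so the adjacency lists are actually built) but some kept edge has an endpoint outside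
-- Python's index range [-n, n) of the n adjacency lists.  (Negative in-range endpoints wrap
-- in BOTH programs, which index lists identically, so they stay inside Pre_.)
def Pre_is_valid_pfes (n : Int) (edges : List (Int × Int)) (budget : Int) (max_cycle_len : Int) (config : List Int) : Prop :=
  (config.length = edges.length ∧ config.sum ≤ budget ∧ n ≠ 0 ∧ 3 ≤ max_cycle_len ∧
      (edges.zip config).filter (fun p => p.2 == 0) ≠ []) →
    ∀ p ∈ (edges.zip config).filter (fun p => p.2 == 0),
      (-n ≤ p.1.1 ∧ p.1.1 < n) ∧ (-n ≤ p.1.2 ∧ p.1.2 < n)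
instance (n : Int) (edges : List (Int × Int)) (budget : Int) (max_cycle_len : Int) (config : List Int) : Decidable (Pre_is_valid_pfes n edges budget max_cycle_len config) := by unfold Pre_is_valid_pfes; infer_instance

def pvWitness_is_valid_pfes : Int × (List (Int × Int)) × Int × Int × List Int :=
  (3, [(0, 1), (1, 2), (2, 0)], 1, 3, [1, 0, 0])

def Spec_is_valid_pfes (n : Int) (edges : List (Int × Int)) (budget : Int) (max_cycle_len : Int) (config : List Int) (out : Bool) : Prop := out = is_valid_pfes_alt n edges budget max_cycle_len config
instance (n : Int) (edges : List (Int × Int)) (budget : Int) (max_cycle_len : Int) (config : List Int) (out : Bool) : Decidable (Spec_is_valid_pfes n edges budget max_cycle_len config out) := by unfold Spec_is_valid_pfes; infer_instance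

-- ===== CLAIM (what is proved, stated in full; the proofs are below) =====
def Claim_equal_is_valid_pfes : Prop := ∀ (n : Int) (edges : List (Int × Int)) (budget : Int) (max_cycle_len : Int) (config : List Int), Dom_is_valid_pfes n edges budget max_cycle_len config → Pre_is_valid_pfes n edges budget max_cycle_len config → Spec_is_valid_pfes n edges budget max_cycle_len config (is_valid_pfes n edges budget max_cycle_len config)

-- ===== LEMMAS AND PROOFS =====

theorem pfes_witness_ok :
    Dom_is_valid_pfes pvWitness_is_valid_pfes.1 pvWitness_is_valid_pfes.2.1
        pvWitness_is_valid_pfes.2.2.1 pvWitness_is_valid_pfes.2.2.2.1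
        pvWitness_is_valid_pfes.2.2.2.2 ∧
      Pre_is_valid_pfes pvWitness_is_valid_pfes.1 pvWitness_is_valid_pfes.2.1
        pvWitness_is_valid_pfes.2.2.1 pvWitness_is_valid_pfes.2.2.2.1
        pvWitness_is_valid_pfes.2.2.2.2 := by
  constructor <;> decide

-- a resolved Python index is in range
theorem pfes_pyIdx_lt (len : Nat) (i : Int) (k : Nat)
    (h : PySem.List.pyIdx? len i = some k) : k < len := by
  unfold PySem.List.pyIdx? at h
  split_ifs at h with h1 h2 h3 <;> simp_all <;> omega

-- `visited[i] = True; …; visited[i] = False` restores visited when visited[i] was False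
theorem pfes_set_cancel (vis : List Bool) (i : Int)
    (h : PySem.List.pyGetD vis i false = false) :
    PySem.List.pySetD (PySem.List.pySetD vis i true) i false = vis := by
  unfold PySem.List.pySetD PySem.List.pySet?
  cases hk : PySem.List.pyIdx? vis.length i with
  | none => simp [hk]
  | some k =>
    have hkl : k < vis.length := pfes_pyIdx_lt _ _ _ hk
    have hv : vis[k] = false := by
      unfold PySem.List.pyGetD PySem.List.pyGet? at h
      rw [hk] at h
      simpa [List.getElem?_eq_getElem hkl] using h
    simp only [hk, Option.map_some, Option.getD_some, List.length_set, List.set_set]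
    rw [← hv]
    simp [List.set_getElem_self]

-- reading at a different nonnegative index is unaffected by a write
theorem pfes_getD_set_ne {α : Type} (vis : List α) (a b : Int) (x d : α)
    (ha : 0 ≤ a) (hb : 0 ≤ b) (hne : a ≠ b) :
    PySem.List.pyGetD (PySem.List.pySetD vis b x) a d = PySem.List.pyGetD vis a d := by
  rw [PySem.List.pySetD_of_nonneg vis x hb]
  unfold PySem.List.pyGetD PySem.List.pyGet? PySem.List.pyIdx?
  simp only [List.length_set, if_pos ha]
  split_ifs with h1
  · simp only [Option.bind_some]
    rw [List.getElem?_set_ne (by omega : b.toNat ≠ a.toNat)]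
  · rfl

-- reading back a written in-range nonnegative index
theorem pfes_getD_set_self (vis : List Bool) (i : Int) (v : Bool)
    (h0 : 0 ≤ i) (hl : i < (vis.length : Int)) :
    PySem.List.pyGetD (PySem.List.pySetD vis i v) i false = v := by
  rw [PySem.List.pySetD_of_nonneg vis v h0]
  rw [PySem.List.pyGetD_eq_getElem _ _ h0 (by simpa using hl)]
  simp [List.getElem_set_self]

theorem pfes_getD_replicate (k : Nat) (i : Int) :
    PySem.List.pyGetD (List.replicate k false) i false = false := by
  unfold PySem.List.pyGetD PySem.List.pyGet?
  cases hk : PySem.List.pyIdx? (List.replicate k false).length i with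
  | none => rfl
  | some j =>
    have hj := pfes_pyIdx_lt _ _ _ hk
    simp only [List.length_replicate] at hj
    simp [List.getElem?_replicate, hj]

theorem pfes_adj_map (adjA : List (List (Int × Int))) (i : Int) :
    PySem.List.pyGetD (adjA.map (List.map Prod.fst)) i [] =
      (PySem.List.pyGetD adjA i []).map Prod.fst := by
  simpa using PySem.List.pyGetD_map (List.map Prod.fst) adjA i []

theorem pfes_appendAt_map (adj : List (List (Int × Int))) (i : Int) (x : Int × Int) :
    (pfesAppendAt adj i x).map (List.map Prod.fst) =
      pfesAppendAt (adj.map (List.map Prod.fst)) i x.1 := by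
  unfold pfesAppendAt PySem.List.pySetD PySem.List.pySet?
  rw [List.length_map]
  cases hk : PySem.List.pyIdx? adj.length i with
  | none => simp [hk]
  | some k =>
    simp only [hk, Option.map_some, Option.getD_some, List.map_set]
    rw [pfes_adj_map]
    simp

theorem pfes_build_aux :
    ∀ (l : List (Int × Int)) (s : Int) (adj : List (List (Int × Int))),
      l.foldl (fun adj p => pfesAppendAt (pfesAppendAt adj p.1 p.2) p.2 p.1)
          (adj.map (List.map Prod.fst)) =
        ((PySem.List.enumerate l s).foldl
            (fun adj p => pfesAppendAt (pfesAppendAt adj p.2.1 (p.2.2, p.1)) p.2.2 (p.2.1, p.1))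
            adj).map (List.map Prod.fst)
  | [], s, adj => by simp [PySem.List.enumerate]
  | (u, v) :: t, s, adj => by
    rw [PySem.List.enumerate_cons]
    simp only [List.foldl_cons]
    rw [← pfes_build_aux t (s + 1) (pfesAppendAt (pfesAppendAt adj u (v, s)) v (u, s))]
    congr 1
    rw [pfes_appendAt_map, pfes_appendAt_map]

theorem pfes_build_map (n : Int) (kept : List (Int × Int)) :
    pfesBuildB n kept = (pfesBuildA n kept).map (List.map Prod.fst) := by
  unfold pfesBuildB pfesBuildA
  rw [← pfes_build_aux kept 0 (List.replicate n.toNat [])]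
  simp

theorem pfes_add_ne_nil {α : Type} [BEq α] (s : PySem.Set α) (x : α) :
    PySem.Set.add s x ≠ [] := by
  unfold PySem.Set.add
  split_ifs with h
  · intro hnil
    subst hnil
    simp [PySem.Set.contains] at h
  · simp

-- A's dfs only grows the cycle set
theorem pfesDfsA_mono (adjA : List (List (Int × Int))) (maxLen start : Int) :
    ∀ fuel nbrs pe pl vis cyc,
      (pfesDfsA adjA maxLen start fuel nbrs pe pl vis cyc).2 = [] → cyc = [] := by
  intro fuel
  induction fuel with
  | zero =>
    intro nbrs
    induction nbrs with
    | nil => intro pe pl vis cyc h; rw [pfesDfsA] at h; exact h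
    | cons hd rest ihl =>
      obtain ⟨nb, eidx⟩ := hd
      intro pe pl vis cyc h
      by_cases h1 : nb = start ∧ 3 ≤ pl + 1
      · rw [pfesDfsA, if_pos h1] at h
        have := ihl _ _ _ _ h
        split_ifs at this with hle
        · exact absurd this (pfes_add_ne_nil _ _)
        · exact this
      · by_cases h2 : PySem.List.pyGetD vis nb false = true ∨ nb < start ∨ maxLen ≤ pl + 1
        · rw [pfesDfsA, if_neg h1, if_pos h2] at h
          exact ihl _ _ _ _ h
        · rw [pfesDfsA, if_neg h1, if_neg h2] at h
          exact ihl _ _ _ _ h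
  | succ fuel' ihf =>
    intro nbrs
    induction nbrs with
    | nil => intro pe pl vis cyc h; rw [pfesDfsA] at h; exact h
    | cons hd rest ihl =>
      obtain ⟨nb, eidx⟩ := hd
      intro pe pl vis cyc h
      by_cases h1 : nb = start ∧ 3 ≤ pl + 1
      · rw [pfesDfsA, if_pos h1] at h
        have := ihl _ _ _ _ h
        split_ifs at this with hle
        · exact absurd this (pfes_add_ne_nil _ _)
        · exact this
      · by_cases h2 : PySem.List.pyGetD vis nb false = true ∨ nb < start ∨ maxLen ≤ pl + 1
        · rw [pfesDfsA, if_neg h1, if_pos h2] at h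
          exact ihl _ _ _ _ h
        · simp only [pfesDfsA, if_neg h1, if_neg h2] at h
          exact ihf _ _ _ _ _ (ihl _ _ _ _ h)

-- A's dfs restores visited
theorem pfesDfsA_vis (adjA : List (List (Int × Int))) (maxLen start : Int) :
    ∀ fuel nbrs pe pl vis cyc,
      (pfesDfsA adjA maxLen start fuel nbrs pe pl vis cyc).1 = vis := by
  intro fuel
  induction fuel with
  | zero =>
    intro nbrs
    induction nbrs with
    | nil => intro pe pl vis cyc; rw [pfesDfsA]
    | cons hd rest ihl =>
      obtain ⟨nb, eidx⟩ := hd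
      intro pe pl vis cyc
      by_cases h1 : nb = start ∧ 3 ≤ pl + 1
      · rw [pfesDfsA, if_pos h1]; exact ihl _ _ _ _
      · by_cases h2 : PySem.List.pyGetD vis nb false = true ∨ nb < start ∨ maxLen ≤ pl + 1
        · rw [pfesDfsA, if_neg h1, if_pos h2]; exact ihl _ _ _ _
        · rw [pfesDfsA, if_neg h1, if_neg h2]; exact ihl _ _ _ _
  | succ fuel' ihf =>
    intro nbrs
    induction nbrs with
    | nil => intro pe pl vis cyc; rw [pfesDfsA]
    | cons hd rest ihl =>
      obtain ⟨nb, eidx⟩ := hd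
      intro pe pl vis cyc
      by_cases h1 : nb = start ∧ 3 ≤ pl + 1
      · rw [pfesDfsA, if_pos h1]; exact ihl _ _ _ _
      · by_cases h2 : PySem.List.pyGetD vis nb false = true ∨ nb < start ∨ maxLen ≤ pl + 1
        · rw [pfesDfsA, if_neg h1, if_pos h2]; exact ihl _ _ _ _
        · have hnb : PySem.List.pyGetD vis nb false = false := by
            push_neg at h2
            simpa using h2.1
          simp only [pfesDfsA, if_neg h1, if_neg h2]
          rw [ihl _ _ _ _, ihf _ _ _ _ _]
          exact pfes_set_cancel vis nb hnb

-- B's search restores visited when it fails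
theorem pfesSearchB_vis (adjB : List (List Int)) (maxLen start : Int) :
    ∀ fuel nbrs vis d,
      (pfesSearchB adjB maxLen start fuel nbrs vis d).2 = false →
      (pfesSearchB adjB maxLen start fuel nbrs vis d).1 = vis := by
  intro fuel
  induction fuel with
  | zero =>
    intro nbrs
    induction nbrs with
    | nil => intro vis d _; rw [pfesSearchB]
    | cons nb rest ihl =>
      intro vis d h
      by_cases h1 : nb = start ∧ 3 ≤ d + 1 ∧ d + 1 ≤ maxLen
      · rw [pfesSearchB, if_pos h1] at h
        simp at h
      · by_cases h2 : nb = start ∨ PySem.List.pyGetD vis nb false = true ∨ nb < start ∨ maxLen ≤ d + 1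
        · rw [pfesSearchB, if_neg h1, if_pos h2] at h ⊢
          exact ihl _ _ h
        · rw [pfesSearchB, if_neg h1, if_neg h2] at h ⊢
          exact ihl _ _ h
  | succ fuel' ihf =>
    intro nbrs
    induction nbrs with
    | nil => intro vis d _; rw [pfesSearchB]
    | cons nb rest ihl =>
      intro vis d h
      by_cases h1 : nb = start ∧ 3 ≤ d + 1 ∧ d + 1 ≤ maxLen
      · rw [pfesSearchB, if_pos h1] at h
        simp at h
      · by_cases h2 : nb = start ∨ PySem.List.pyGetD vis nb false = true ∨ nb < start ∨ maxLen ≤ d + 1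
        · rw [pfesSearchB, if_neg h1, if_pos h2] at h ⊢
          exact ihl _ _ h
        · have hnb : PySem.List.pyGetD vis nb false = false := by
            push_neg at h2
            simpa using h2.2.1
          simp only [pfesSearchB, if_neg h1, if_neg h2] at h ⊢
          by_cases hr : (pfesSearchB adjB maxLen start fuel' (PySem.List.pyGetD adjB nb [])
              (PySem.List.pySetD vis nb true) (d + 1)).2 = true
          · rw [if_pos hr] at h
            simp at h
          · rw [if_neg hr] at h ⊢
            rw [ihl _ _ h, ihf _ _ _ (by simpa using hr)]
            exact pfes_set_cancel vis nb hnb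

-- core: A's dfs leaves the cycle set empty iff it was empty and B's search fails
theorem pfes_dfs_eq (adjA : List (List (Int × Int))) (maxLen start : Int) (hstart : 0 ≤ start) :
    ∀ fuel nbrs pe pl vis cyc,
      PySem.List.pyGetD vis start false = true →
      ((pfesDfsA adjA maxLen start fuel nbrs pe pl vis cyc).2 = [] ↔
        (cyc = [] ∧ (pfesSearchB (adjA.map (List.map Prod.fst)) maxLen start fuel
            (nbrs.map Prod.fst) vis pl).2 = false)) := by
  intro fuel
  induction fuel with
  | zero =>
    intro nbrs
    induction nbrs with
    | nil =>
      intro pe pl vis cyc hvis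
      rw [pfesDfsA]
      simp only [List.map_nil]
      rw [pfesSearchB]
      simp
    | cons hd rest ihl =>
      obtain ⟨nb, eidx⟩ := hd
      intro pe pl vis cyc hvis
      simp only [List.map_cons]
      by_cases h1 : nb = start ∧ 3 ≤ pl + 1
      · by_cases hle : pl + 1 ≤ maxLen
        · rw [pfesDfsA, if_pos h1, if_pos hle, pfesSearchB, if_pos ⟨h1.1, h1.2, hle⟩]
          constructor
          · intro hA
            exact absurd (pfesDfsA_mono adjA maxLen start _ _ _ _ _ _ hA)
              (pfes_add_ne_nil _ _)
          · rintro ⟨-, hB⟩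
            simp at hB
        · rw [pfesDfsA, if_pos h1, if_neg hle, pfesSearchB,
            if_neg (fun hc => hle hc.2.2), if_pos (Or.inl h1.1)]
          exact ihl pe pl vis cyc hvis
      · by_cases h2 : PySem.List.pyGetD vis nb false = true ∨ nb < start ∨ maxLen ≤ pl + 1
        · rw [pfesDfsA, if_neg h1, if_pos h2, pfesSearchB,
            if_neg (fun hc => h1 ⟨hc.1, hc.2.1⟩), if_pos (Or.inr h2)]
          exact ihl pe pl vis cyc hvis
        · have hnbvis : PySem.List.pyGetD vis nb false = false := by
            push_neg at h2
            simpa using h2.1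
          have hns : nb ≠ start := by
            intro he
            rw [he] at hnbvis
            have := hvis.symm.trans hnbvis
            simp at this
          rw [pfesDfsA, if_neg h1, if_neg h2, pfesSearchB,
            if_neg (fun hc => hns hc.1), if_neg (fun hc => hc.elim hns h2)]
          exact ihl pe pl vis cyc hvis
  | succ fuel' ihf =>
    intro nbrs
    induction nbrs with
    | nil =>
      intro pe pl vis cyc hvis
      rw [pfesDfsA]
      simp only [List.map_nil]
      rw [pfesSearchB]
      simp
    | cons hd rest ihl =>
      obtain ⟨nb, eidx⟩ := hd
      intro pe pl vis cyc hvis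
      simp only [List.map_cons]
      by_cases h1 : nb = start ∧ 3 ≤ pl + 1
      · by_cases hle : pl + 1 ≤ maxLen
        · rw [pfesDfsA, if_pos h1, if_pos hle, pfesSearchB, if_pos ⟨h1.1, h1.2, hle⟩]
          constructor
          · intro hA
            exact absurd (pfesDfsA_mono adjA maxLen start _ _ _ _ _ _ hA)
              (pfes_add_ne_nil _ _)
          · rintro ⟨-, hB⟩
            simp at hB
        · rw [pfesDfsA, if_pos h1, if_neg hle, pfesSearchB,
            if_neg (fun hc => hle hc.2.2), if_pos (Or.inl h1.1)]
          exact ihl pe pl vis cyc hvis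
      · by_cases h2 : PySem.List.pyGetD vis nb false = true ∨ nb < start ∨ maxLen ≤ pl + 1
        · rw [pfesDfsA, if_neg h1, if_pos h2, pfesSearchB,
            if_neg (fun hc => h1 ⟨hc.1, hc.2.1⟩), if_pos (Or.inr h2)]
          exact ihl pe pl vis cyc hvis
        · have hnbvis : PySem.List.pyGetD vis nb false = false := by
            push_neg at h2
            simpa using h2.1
          have hns : nb ≠ start := by
            intro he
            rw [he] at hnbvis
            have := hvis.symm.trans hnbvis
            simp at this
          have hsn : start < nb := by
            push_neg at h2
            exact lt_of_le_of_ne h2.2.1 (Ne.symm hns)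
          have hnb0 : 0 ≤ nb := le_trans hstart (le_of_lt hsn)
          have hvis1 : PySem.List.pyGetD (PySem.List.pySetD vis nb true) start false = true := by
            rw [pfes_getD_set_ne _ _ _ _ _ hstart hnb0 (Ne.symm hns)]
            exact hvis
          have hB1 : ¬(nb = start ∧ 3 ≤ pl + 1 ∧ pl + 1 ≤ maxLen) := fun hc => hns hc.1
          have hB2 : ¬(nb = start ∨ PySem.List.pyGetD vis nb false = true ∨ nb < start ∨
              maxLen ≤ pl + 1) := fun hc => hc.elim hns h2
          simp only [pfesDfsA, pfesSearchB, if_neg h1, if_neg h2, if_neg hB1, if_neg hB2,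
            pfes_adj_map]
          set rA := pfesDfsA adjA maxLen start fuel' (PySem.List.pyGetD adjA nb [])
            (pe ++ [eidx]) (pl + 1) (PySem.List.pySetD vis nb true) cyc with hrA
          set rB := pfesSearchB (adjA.map (List.map Prod.fst)) maxLen start fuel'
            ((PySem.List.pyGetD adjA nb []).map Prod.fst)
            (PySem.List.pySetD vis nb true) (pl + 1) with hrB
          have hIH1 : rA.2 = [] ↔ (cyc = [] ∧ rB.2 = false) :=
            ihf (PySem.List.pyGetD adjA nb []) (pe ++ [eidx]) (pl + 1)
              (PySem.List.pySetD vis nb true) cyc hvis1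
          by_cases hb : rB.2 = true
          · rw [if_pos hb]
            constructor
            · intro hA
              have hr2 : rA.2 = [] := pfesDfsA_mono adjA maxLen start _ _ _ _ _ _ hA
              have := (hIH1.mp hr2).2
              rw [hb] at this
              simp at this
            · rintro ⟨-, hB⟩
              simp at hB
          · have hb' : rB.2 = false := by simpa using hb
            rw [if_neg hb]
            have hvA : rA.1 = PySem.List.pySetD vis nb true :=
              pfesDfsA_vis adjA maxLen start _ _ _ _ _ _
            have hvB : rB.1 = PySem.List.pySetD vis nb true :=
              pfesSearchB_vis _ maxLen start _ _ _ _ hb'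
            have hcA : PySem.List.pySetD rA.1 nb false = vis := by
              rw [hvA]
              exact pfes_set_cancel vis nb hnbvis
            have hcB : PySem.List.pySetD rB.1 nb false = vis := by
              rw [hvB]
              exact pfes_set_cancel vis nb hnbvis
            rw [hcA, hcB]
            rw [ihl pe pl vis rA.2 hvis, hIH1, hb']
            all_goals tauto

theorem pfesInnerA_mono (adjA : List (List (Int × Int))) (maxLen start : Int) (fuel : Nat) :
    ∀ nbrs vis cyc, (pfesInnerA adjA maxLen start fuel nbrs vis cyc).2 = [] → cyc = [] := by
  intro nbrs
  induction nbrs with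
  | nil => intro vis cyc h; rw [pfesInnerA] at h; exact h
  | cons hd rest ihl =>
    obtain ⟨nb, eidx⟩ := hd
    intro vis cyc h
    by_cases hle : nb ≤ start
    · rw [pfesInnerA, if_pos hle] at h
      exact ihl _ _ h
    · simp only [pfesInnerA, if_neg hle] at h
      exact pfesDfsA_mono adjA maxLen start _ _ _ _ _ _ (ihl _ _ h)

theorem pfesOuterA_mono (adjA : List (List (Int × Int))) (maxLen : Int) (fuel : Nat) :
    ∀ starts vis cyc, (pfesOuterA adjA maxLen fuel starts vis cyc).2 = [] → cyc = [] := by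
  intro starts
  induction starts with
  | nil => intro vis cyc h; rw [pfesOuterA] at h; exact h
  | cons start rest ihl =>
    intro vis cyc h
    simp only [pfesOuterA] at h
    exact pfesInnerA_mono adjA maxLen start fuel _ _ _ (ihl _ _ h)

theorem pfesInnerA_vis (adjA : List (List (Int × Int))) (maxLen start : Int) (fuel : Nat)
    (hstart : 0 ≤ start) :
    ∀ nbrs vis cyc,
      (∀ i : Int, 0 ≤ i → i ≠ start → PySem.List.pyGetD vis i false = false) →
      (pfesInnerA adjA maxLen start fuel nbrs vis cyc).1 = vis := by
  intro nbrs
  induction nbrs with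
  | nil => intro vis cyc _; rw [pfesInnerA]
  | cons hd rest ihl =>
    obtain ⟨nb, eidx⟩ := hd
    intro vis cyc hother
    by_cases hle : nb ≤ start
    · rw [pfesInnerA, if_pos hle]
      exact ihl vis cyc hother
    · have hsn : start < nb := not_le.mp hle
      have hnbF : PySem.List.pyGetD vis nb false = false :=
        hother nb (le_trans hstart (le_of_lt hsn)) (ne_of_gt hsn)
      simp only [pfesInnerA, if_neg hle]
      rw [pfesDfsA_vis adjA maxLen start _ _ _ _ _ _, pfes_set_cancel vis nb hnbF]
      exact ihl vis _ hother

theorem pfesInnerB_vis (adjB : List (List Int)) (maxLen start : Int) (fuel : Nat)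
    (hstart : 0 ≤ start) :
    ∀ nbrs vis,
      (∀ i : Int, 0 ≤ i → i ≠ start → PySem.List.pyGetD vis i false = false) →
      (pfesInnerB adjB maxLen start fuel nbrs vis).2 = false →
      (pfesInnerB adjB maxLen start fuel nbrs vis).1 = vis := by
  intro nbrs
  induction nbrs with
  | nil => intro vis _ _; rw [pfesInnerB]
  | cons nb rest ihl =>
    intro vis hother h
    by_cases hsn : start < nb
    · have hnbF : PySem.List.pyGetD vis nb false = false :=
        hother nb (le_trans hstart (le_of_lt hsn)) (ne_of_gt hsn)
      simp only [pfesInnerB, if_pos hsn] at h ⊢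
      by_cases hb : (pfesSearchB adjB maxLen start fuel (PySem.List.pyGetD adjB nb [])
          (PySem.List.pySetD vis nb true) 1).2 = true
      · rw [if_pos hb] at h
        simp at h
      · have hb' := Bool.not_eq_true _ ▸ hb
        rw [if_neg hb] at h ⊢
        rw [pfesSearchB_vis adjB maxLen start _ _ _ _ (by simpa using hb),
          pfes_set_cancel vis nb hnbF] at h ⊢
        exact ihl vis hother h
    · rw [pfesInnerB, if_neg hsn] at h ⊢
      exact ihl vis hother h

theorem pfes_inner_eq (adjA : List (List (Int × Int))) (maxLen start : Int) (fuel : Nat)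
    (hstart : 0 ≤ start) :
    ∀ nbrs vis cyc,
      PySem.List.pyGetD vis start false = true →
      (∀ i : Int, 0 ≤ i → i ≠ start → PySem.List.pyGetD vis i false = false) →
      ((pfesInnerA adjA maxLen start fuel nbrs vis cyc).2 = [] ↔
        (cyc = [] ∧ (pfesInnerB (adjA.map (List.map Prod.fst)) maxLen start fuel
            (nbrs.map Prod.fst) vis).2 = false)) := by
  intro nbrs
  induction nbrs with
  | nil =>
    intro vis cyc hvis hother
    rw [pfesInnerA]
    simp only [List.map_nil]
    rw [pfesInnerB]
    simp
  | cons hd rest ihl =>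
    obtain ⟨nb, eidx⟩ := hd
    intro vis cyc hvis hother
    simp only [List.map_cons]
    by_cases hle : nb ≤ start
    · rw [pfesInnerA, if_pos hle, pfesInnerB, if_neg (not_lt.mpr hle)]
      exact ihl vis cyc hvis hother
    · have hsn : start < nb := not_le.mp hle
      have hnb0 : 0 ≤ nb := le_trans hstart (le_of_lt hsn)
      have hnbF : PySem.List.pyGetD vis nb false = false :=
        hother nb hnb0 (ne_of_gt hsn)
      have hvis1 : PySem.List.pyGetD (PySem.List.pySetD vis nb true) start false = true := by
        rw [pfes_getD_set_ne _ _ _ _ _ hstart hnb0 (ne_of_lt hsn)]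
        exact hvis
      simp only [pfesInnerA, pfesInnerB, if_neg hle, if_pos hsn, pfes_adj_map]
      set rA := pfesDfsA adjA maxLen start fuel (PySem.List.pyGetD adjA nb []) [eidx] 1
        (PySem.List.pySetD vis nb true) cyc with hrA
      set rB := pfesSearchB (adjA.map (List.map Prod.fst)) maxLen start fuel
        ((PySem.List.pyGetD adjA nb []).map Prod.fst) (PySem.List.pySetD vis nb true) 1 with hrB
      have hIH1 : rA.2 = [] ↔ (cyc = [] ∧ rB.2 = false) :=
        pfes_dfs_eq adjA maxLen start hstart fuel (PySem.List.pyGetD adjA nb []) [eidx] 1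
          (PySem.List.pySetD vis nb true) cyc hvis1
      by_cases hb : rB.2 = true
      · rw [if_pos hb]
        constructor
        · intro hA
          have hr2 : rA.2 = [] := pfesInnerA_mono adjA maxLen start fuel _ _ _ hA
          have := (hIH1.mp hr2).2
          rw [hb] at this
          simp at this
        · rintro ⟨-, hB⟩
          simp at hB
      · have hb' : rB.2 = false := by simpa using hb
        rw [if_neg hb]
        have hvA : rA.1 = PySem.List.pySetD vis nb true :=
          pfesDfsA_vis adjA maxLen start _ _ _ _ _ _
        have hvB : rB.1 = PySem.List.pySetD vis nb true :=
          pfesSearchB_vis _ maxLen start _ _ _ _ hb'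
        have hcA : PySem.List.pySetD rA.1 nb false = vis := by
          rw [hvA]
          exact pfes_set_cancel vis nb hnbF
        have hcB : PySem.List.pySetD rB.1 nb false = vis := by
          rw [hvB]
          exact pfes_set_cancel vis nb hnbF
        rw [hcA, hcB]
        rw [ihl vis rA.2 hvis hother, hIH1, hb']
        all_goals tauto

theorem pfes_outer_eq (adjA : List (List (Int × Int))) (maxLen : Int) (fuel : Nat) :
    ∀ starts vis cyc,
      (∀ s ∈ starts, 0 ≤ s ∧ s < (vis.length : Int)) →
      (∀ i : Int, 0 ≤ i → PySem.List.pyGetD vis i false = false) →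
      ((pfesOuterA adjA maxLen fuel starts vis cyc).2 = [] ↔
        (cyc = [] ∧ pfesOuterB (adjA.map (List.map Prod.fst)) maxLen fuel starts vis = false)) := by
  intro starts
  induction starts with
  | nil =>
    intro vis cyc _ _
    rw [pfesOuterA, pfesOuterB]
    simp
  | cons start rest ihl =>
    intro vis cyc hmem hall
    obtain ⟨hs0, hslen⟩ := hmem start (List.mem_cons_self)
    have hsF : PySem.List.pyGetD vis start false = false := hall start hs0
    have hvis1 : PySem.List.pyGetD (PySem.List.pySetD vis start true) start false = true :=
      pfes_getD_set_self vis start true hs0 hslen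
    have hother1 : ∀ i : Int, 0 ≤ i → i ≠ start →
        PySem.List.pyGetD (PySem.List.pySetD vis start true) i false = false := by
      intro i hi hne
      rw [pfes_getD_set_ne _ _ _ _ _ hi hs0 hne]
      exact hall i hi
    simp only [pfesOuterA, pfesOuterB, pfes_adj_map]
    set rA := pfesInnerA adjA maxLen start fuel (PySem.List.pyGetD adjA start [])
      (PySem.List.pySetD vis start true) cyc with hrA
    set rB := pfesInnerB (adjA.map (List.map Prod.fst)) maxLen start fuel
      ((PySem.List.pyGetD adjA start []).map Prod.fst) (PySem.List.pySetD vis start true) with hrB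
    have hIH1 : rA.2 = [] ↔ (cyc = [] ∧ rB.2 = false) :=
      pfes_inner_eq adjA maxLen start fuel hs0 (PySem.List.pyGetD adjA start [])
        (PySem.List.pySetD vis start true) cyc hvis1 hother1
    by_cases hb : rB.2 = true
    · rw [if_pos hb]
      constructor
      · intro hA
        have hr2 : rA.2 = [] := pfesOuterA_mono adjA maxLen fuel _ _ _ hA
        have := (hIH1.mp hr2).2
        rw [hb] at this
        simp at this
      · rintro ⟨-, hB⟩
        simp at hB
    · have hb' : rB.2 = false := by simpa using hb
      rw [if_neg hb]
      have hvA : rA.1 = PySem.List.pySetD vis start true :=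
        pfesInnerA_vis adjA maxLen start fuel hs0 _ _ _ hother1
      have hvB : rB.1 = PySem.List.pySetD vis start true :=
        pfesInnerB_vis _ maxLen start fuel hs0 _ _ hother1 hb'
      have hcA : PySem.List.pySetD rA.1 start false = vis := by
        rw [hvA]
        exact pfes_set_cancel vis start hsF
      have hcB : PySem.List.pySetD rB.1 start false = vis := by
        rw [hvB]
        exact pfes_set_cancel vis start hsF
      rw [hcA, hcB]
      rw [ihl vis rA.2 (fun s hs => hmem s (List.mem_cons_of_mem _ hs)) hall, hIH1, hb']
      all_goals tauto

-- ===== VERDICT (by name: the statement is the Claim_ definition above) =====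
theorem is_valid_pfes_spec : Claim_equal_is_valid_pfes := by
  intro n edges budget maxLen config _ _
  unfold Spec_is_valid_pfes
  simp only [is_valid_pfes, is_valid_pfes_alt]
  by_cases h1 : config.length ≠ edges.length
  · rw [if_pos h1, if_pos (Or.inl h1)]
  · rw [if_neg h1]
    by_cases h2 : budget < config.sum
    · rw [if_pos h2, if_pos (Or.inr h2)]
    · rw [if_neg h2, if_neg (fun hc => hc.elim h1 h2)]
      set kept := ((edges.zip config).filter (fun p => p.2 == 0)).map Prod.fst with hkept
      by_cases h3 : n = 0 ∨ kept = [] ∨ maxLen < 3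
      · rw [if_pos h3]
        simp [pfesFindAll, h3]
      · rw [if_neg h3]
        simp only [pfesFindAll, if_neg h3]
        rw [pfes_build_map]
        have hkey := pfes_outer_eq (pfesBuildA n kept) maxLen n.toNat
          (PySem.List.pyRange 0 n 1) (List.replicate n.toNat false) PySem.Set.empty
          (by
            intro s hs
            have hm := (PySem.List.mem_pyRange_one).mp hs
            refine ⟨hm.1, ?_⟩
            have hn : 0 < n := lt_of_le_of_lt hm.1 hm.2
            simpa [Int.toNat_of_nonneg (le_of_lt hn)] using hm.2)
          (fun i _ => pfes_getD_replicate _ _)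
        by_cases hB : pfesOuterB ((pfesBuildA n kept).map (List.map Prod.fst)) maxLen n.toNat
            (PySem.List.pyRange 0 n 1) (List.replicate n.toNat false) = true
        · rw [hB]
          simp only [Bool.not_true]
          apply decide_eq_false
          intro hc
          rw [List.length_map, List.length_eq_zero_iff] at hc
          have := (hkey.mp hc).2
          rw [hB] at this
          simp at this
        · have hB' : pfesOuterB ((pfesBuildA n kept).map (List.map Prod.fst)) maxLen n.toNat
              (PySem.List.pyRange 0 n 1) (List.replicate n.toNat false) = false := by
            simpa using hB
          have hr2 : (pfesOuterA (pfesBuildA n kept) maxLen n.toNat (PySem.List.pyRange 0 n 1)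
              (List.replicate n.toNat false) PySem.Set.empty).2 = [] :=
            hkey.mpr ⟨rfl, hB'⟩
          rw [hB', hr2]
          simp
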